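-- pv_equiv track=rewrite | github.com/thierryc/Glyphs-mcp | plugin-manager/Glyphs MCP.glyphsPlugin/Contents/Resources/MCP Documentation/mcp_doc_generator.py | _iter_plaintext_lines
-- ===== SOURCE A (Python) =====
-- from typing import Dict, Iterable, List
--
-- SKIP_BLOCK_DIRECTIVES = {
--     "code-block",
--     "autosummary",
--     "image",
--     "figure",
--     "seealso",
-- }
--
-- def _iter_plaintext_lines(lines: Iterable[str]) -> Iterable[str]:
--     """Yield non-directive lines suitable for summary extraction."""
--
--     skip_block = False
--     for line in lines:
--         if skip_block:
--             if line.startswith((" ", "\t")) or not line.strip():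
--                 continue
--             skip_block = False
--
--         stripped = line.strip()
--         if not stripped:
--             yield ""
--             continue
--
--         if stripped.startswith(".. "):
--             directive_name = stripped[3:].split("::", 1)[0].strip()
--             if directive_name in SKIP_BLOCK_DIRECTIVES:
--                 skip_block = True
--                 continue
--             # Skip the directive line itself but keep its descriptive body
--             continue
--
--         if stripped.startswith(":") and ":" in stripped[1:]:
--             # Field list or inline role definition
--             continue
--
--         if len(set(stripped)) == 1 and stripped[0] in "=-~`^'\"*+#_":
--             # Heading underline or separator
--             continue
--
--         yield stripped
-- ===== SOURCE B (Python) =====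
-- SKIP_BLOCK_DIRECTIVES = {
--     "code-block",
--     "autosummary",
--     "image",
--     "figure",
--     "seealso",
-- }
--
-- def _iter_plaintext_lines(lines):
--     """Yield non-directive lines suitable for summary extraction."""
--     lines = list(lines)
--     n = len(lines)
--     out = []
--     i = 0
--     while i < n:
--         stripped = lines[i].strip()
--         i += 1
--         if not stripped:
--             out.append("")
--         elif stripped.startswith(".. "):
--             if stripped[3:].split("::", 1)[0].strip() in SKIP_BLOCK_DIRECTIVES:
--                 # consume the directive's indented/blank body with an inner loop
--                 while i < n and (lines[i].startswith((" ", "\t")) or not lines[i].strip()):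
--                     i += 1
--             # non-skip directive line itself is dropped, its body is kept
--         elif stripped.startswith(":") and ":" in stripped[1:]:
--             pass
--         elif len(set(stripped)) == 1 and stripped[0] in "=-~`^'\"*+#_":
--             pass
--         else:
--             out.append(stripped)
--     return out
-- ===== Notes on version B (the rewrite author's own statement) =====
-- stated objective: alternative
-- what changed: Replaces A's persistent skip_block boolean threaded through a generator with an index-driven loop that consumes a skip directive's indented/blank body in an explicit inner while-loop and appends kept lines to an output list.
import Mathlib
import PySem

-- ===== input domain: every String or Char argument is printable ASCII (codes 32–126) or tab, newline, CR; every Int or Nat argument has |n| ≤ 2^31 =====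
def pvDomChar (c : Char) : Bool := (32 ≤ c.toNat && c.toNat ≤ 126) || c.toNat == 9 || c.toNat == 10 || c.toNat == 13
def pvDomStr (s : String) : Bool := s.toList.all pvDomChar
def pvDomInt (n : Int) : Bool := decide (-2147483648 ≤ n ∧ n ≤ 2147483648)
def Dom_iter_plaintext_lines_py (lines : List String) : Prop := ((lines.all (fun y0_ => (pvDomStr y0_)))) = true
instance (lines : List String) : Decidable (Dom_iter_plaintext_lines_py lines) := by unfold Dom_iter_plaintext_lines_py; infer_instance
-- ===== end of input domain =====

-- B replaces A's persistent skip_block flag with an explicit inner skipping loop; same cost, different decomposition.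
-- (A is a generator; neither version mutates its argument. Equality is about the produced sequence of lines.)

-- shared literal constants (both Pythons contain these same literals)
def pvSkipSet : List String := ["code-block", "autosummary", "image", "figure", "seealso"]
def pvSepChars : List Char := "=-~`^'\"*+#_".toList
-- line.startswith((" ", "\t")) or not line.strip()
def pvBodyLine (l : String) : Bool :=
  PySem.Str.startswith l " " || PySem.Str.startswith l "\t" || PySem.Str.strip l == ""
-- stripped[3:].split("::", 1)[0].strip()
def pvDirName (stripped : String) : String :=
  PySem.Str.strip ((((PySem.Str.splitMax? (PySem.Str.slice stripped (some 3) none) "::" 1).getD []).headD ""))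

-- ===== PORT A =====
-- A's for-loop over `lines` carrying the skip_block flag; yield = cons
def pvALoop (skip : Bool) (lines : List String) : List String :=
  match lines with
  | [] => []
  | line :: rest =>
    if skip && pvBodyLine line then pvALoop true rest
    else
      let stripped := PySem.Str.strip line
      if stripped == "" then "" :: pvALoop false rest
      else if PySem.Str.startswith stripped ".. " then
        if pvSkipSet.contains (pvDirName stripped) then pvALoop true rest
        else pvALoop false rest
      else if PySem.Str.startswith stripped ":" &&
              PySem.Str.isIn ":" (PySem.Str.slice stripped (some 1) none) then
        pvALoop false rest
      else if (PySem.Set.ofList stripped.toList).length == 1 &&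
              pvSepChars.contains (stripped.toList.headD ' ') then
        pvALoop false rest
      else stripped :: pvALoop false rest

def iter_plaintext_lines_py (lines : List String) : List String := pvALoop false lines

-- ===== PORT B =====
-- B's inner `while i < n and (lines[i].startswith((" ","\t")) or not lines[i].strip()): i += 1`
def pvSkipBody : List String → List String
  | [] => []
  | l :: rest => if pvBodyLine l then pvSkipBody rest else l :: rest

theorem pvSkipBody_length_le : ∀ (l : List String), (pvSkipBody l).length ≤ l.length := by
  intro l
  induction l with
  | nil => simp [pvSkipBody]
  | cons x xs ih =>
    simp only [pvSkipBody]
    split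
    · exact Nat.le_succ_of_le ih
    · simp

-- B's outer while-loop over the index, appending kept lines (append = cons here)
def pvBLoop : List String → List String
  | [] => []
  | line :: rest =>
    let stripped := PySem.Str.strip line
    if stripped == "" then "" :: pvBLoop rest
    else if PySem.Str.startswith stripped ".. " then
      if pvSkipSet.contains (pvDirName stripped) then pvBLoop (pvSkipBody rest)
      else pvBLoop rest
    else if PySem.Str.startswith stripped ":" &&
            PySem.Str.isIn ":" (PySem.Str.slice stripped (some 1) none) then
      pvBLoop rest
    else if (PySem.Set.ofList stripped.toList).length == 1 &&
            pvSepChars.contains (stripped.toList.headD ' ') then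
      pvBLoop rest
    else stripped :: pvBLoop rest
termination_by l => l.length
decreasing_by
  all_goals simp_wf
  all_goals exact pvSkipBody_length_le _

def iter_plaintext_lines_py_alt (lines : List String) : List String := pvBLoop lines

-- ===== PRECONDITION & SPEC =====
def Spec_iter_plaintext_lines_py (lines : List String) (out : List String) : Prop := out = iter_plaintext_lines_py_alt lines
instance (lines : List String) (out : List String) : Decidable (Spec_iter_plaintext_lines_py lines out) := by unfold Spec_iter_plaintext_lines_py; infer_instance

-- ===== CLAIM (what is proved, stated in full; the proofs are below) =====
def Claim_equal_iter_plaintext_lines_py : Prop := ∀ (lines : List String), Dom_iter_plaintext_lines_py lines → Spec_iter_plaintext_lines_py lines (iter_plaintext_lines_py lines)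

-- ===== LEMMAS AND PROOFS =====

-- with skip_block set, A drops exactly the lines pvSkipBody drops, then continues with the flag cleared
theorem pvALoop_true_eq (l : List String) : pvALoop true l = pvALoop false (pvSkipBody l) := by
  induction l with
  | nil => rfl
  | cons x xs ih =>
    by_cases h : pvBodyLine x = true
    · simp [pvALoop, pvSkipBody, h, ih]
    · simp [pvALoop, pvSkipBody, h]

theorem pvALoop_eq_pvBLoop : ∀ (n : ℕ) (l : List String), l.length ≤ n → pvALoop false l = pvBLoop l := by
  intro n
  induction n with
  | zero =>
    intro l hl
    have : l = [] := List.length_eq_zero_iff.mp (Nat.le_zero.mp hl)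
    subst this; simp [pvALoop, pvBLoop]
  | succ n ih =>
    intro l hl
    cases l with
    | nil => simp [pvALoop, pvBLoop]
    | cons line rest =>
      have hr : rest.length ≤ n := by simpa using hl
      simp only [pvALoop, pvBLoop, Bool.false_and, if_neg (by simp : ¬ (false = true))]
      split
      · rw [ih rest hr]
      · split
        · split
          · rw [pvALoop_true_eq, ih _ (le_trans (pvSkipBody_length_le rest) hr)]
          · rw [ih rest hr]
        · split
          · rw [ih rest hr]
          · split
            · rw [ih rest hr]
            · rw [ih rest hr]

-- ===== VERDICT (by name: the statement is the Claim_ definition above) =====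
theorem iter_plaintext_lines_py_spec : Claim_equal_iter_plaintext_lines_py := by
  intro lines _
  unfold Spec_iter_plaintext_lines_py iter_plaintext_lines_py iter_plaintext_lines_py_alt
  exact pvALoop_eq_pvBLoop lines.length lines le_rfl
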